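-- pv_equiv track=rewrite | github.com/MetagrossNakajima/pokemon-data | scripts/scrape_usage.py | build_pokedb_id_to_key_map
-- ===== SOURCE A (Python) =====
-- def build_pokedb_id_to_key_map(pokemons):
--     """pokedb ID（例: "0898-02"）→ ポケモンキーのマッピングを構築"""
--     from collections import defaultdict
--     pokedex_groups = defaultdict(list)
--     for key, value in pokemons.items():
--         pokedex_groups[value["pokedex"]].append(key)
--
--     mapping = {}
--     for pokedex, keys in pokedex_groups.items():
--         for form_idx, key in enumerate(keys):
--             pokedb_id = f"{pokedex:04d}-{form_idx:02d}"
--             mapping[pokedb_id] = key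
--     return mapping
-- ===== SOURCE B (Python) =====
-- def build_pokedb_id_to_key_map(pokemons):
--     """pokedb ID（例: "0898-02"）→ ポケモンキーのマッピングを構築"""
--     mapping = {}
--     items = list(pokemons.items())
--     while items:
--         p = items[0][1]["pokedex"]
--         form_idx = 0
--         rest = []
--         for key, value in items:
--             if value["pokedex"] == p:
--                 mapping[f"{p:04d}-{form_idx:02d}"] = key
--                 form_idx += 1
--             else:
--                 rest.append((key, value))
--         items = rest
--     return mapping
-- ===== Notes on version B (the rewrite author's own statement) =====
-- stated objective: alternative
-- what changed: Replaces A's two-phase structure (build a defaultdict of per-pokedex key lists, then enumerate each stored list) with a partition loop: repeatedly take the first remaining entry's pokedex number, emit ids for all entries with that number in one sweep while collecting the non-matching entries as the remainder to process next, so no grouping dict of key lists is ever built.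
import Mathlib
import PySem

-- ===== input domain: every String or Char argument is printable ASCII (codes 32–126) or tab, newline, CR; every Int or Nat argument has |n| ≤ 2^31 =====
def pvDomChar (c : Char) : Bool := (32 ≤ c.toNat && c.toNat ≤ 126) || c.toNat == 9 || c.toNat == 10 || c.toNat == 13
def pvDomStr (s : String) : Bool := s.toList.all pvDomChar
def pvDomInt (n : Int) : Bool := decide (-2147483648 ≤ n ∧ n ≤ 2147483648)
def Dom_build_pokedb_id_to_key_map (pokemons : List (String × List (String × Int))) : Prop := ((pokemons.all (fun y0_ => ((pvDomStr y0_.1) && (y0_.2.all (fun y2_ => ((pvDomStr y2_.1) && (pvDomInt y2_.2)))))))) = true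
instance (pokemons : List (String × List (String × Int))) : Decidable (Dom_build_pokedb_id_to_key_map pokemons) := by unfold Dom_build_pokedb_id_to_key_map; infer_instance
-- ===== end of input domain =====

-- B replaces A's grouping-dict-then-enumerate two-phase structure by a recursive partition loop
-- (emit the first pokedex's group in one sweep, recurse on the non-matching remainder); alternative, not faster.

-- f"{p:04d}": zero-pad the decimal representation to width 4 (Python pads after the sign)
def pvPadZeros (w : Nat) (s : List Char) : List Char := List.replicate (w - s.length) '0' ++ s
def pvFmt04 (p : Int) : String :=
  if p < 0 then String.ofList ('-' :: pvPadZeros 3 (PySem.Int.toStr (-p)).toList)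
  else String.ofList (pvPadZeros 4 (PySem.Int.toStr p).toList)
-- f"{i:02d}" for the (nonnegative) form index
def pvFmt02 (i : Int) : String := String.ofList (pvPadZeros 2 (PySem.Int.toStr i).toList)
-- f"{pokedex:04d}-{form_idx:02d}" (the f-string both Pythons share)
def pvId (p i : Int) : String := String.ofList ((pvFmt04 p).toList ++ '-' :: (pvFmt02 i).toList)

-- ===== PORT A =====
-- pokedex_groups = defaultdict(list); for key, value in pokemons.items(): pokedex_groups[value["pokedex"]].append(key)
def pvGroupsA (pokemons : List (String × List (String × Int))) : PySem.Dict Int (List String) :=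
  pokemons.foldl (fun g kv =>
    match (PySem.Dict.mk kv.2).get? "pokedex" with   -- value["pokedex"]; none = KeyError, excluded by Pre_
    | some p => g.modify p [] (fun ks => ks ++ [kv.1])
    | none => g) PySem.Dict.empty

def build_pokedb_id_to_key_map (pokemons : List (String × List (String × Int))) : List (String × String) :=
  ((pvGroupsA pokemons).items.foldl (fun m pk =>
      (PySem.List.enumerate pk.2 0).foldl (fun m ik => m.insert (pvId pk.1 ik.1) ik.2) m)
    (PySem.Dict.empty : PySem.Dict String String)).items

-- ===== PORT B =====
-- the inner 'for key, value in items' body: state (mapping, form_idx, rest)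
def pvStepB (p : Int) (st : PySem.Dict String String × Int × List (String × List (String × Int)))
    (kv : String × List (String × Int)) :
    PySem.Dict String String × Int × List (String × List (String × Int)) :=
  match (PySem.Dict.mk kv.2).get? "pokedex" with     -- value["pokedex"]; none = KeyError, excluded by Pre_
  | some q =>
      if q == p then (st.1.insert (pvId p st.2.1) kv.1, st.2.1 + 1, st.2.2)  -- mapping[id] = key; form_idx += 1
      else (st.1, st.2.1, st.2.2 ++ [kv])                                     -- rest.append((key, value))
  | none => st

-- termination of the while loop: the sweep over (k0,v0)::rest keeps at most rest.length entries
theorem pvStepB_rest_len (p : Int) (l : List (String × List (String × Int)))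
    (st : PySem.Dict String String × Int × List (String × List (String × Int))) :
    ((l.foldl (pvStepB p) st).2.2).length ≤ st.2.2.length + l.length := by
  induction l generalizing st with
  | nil => simp
  | cons kv t ih =>
      simp only [List.foldl_cons, List.length_cons]
      refine le_trans (ih _) ?_
      unfold pvStepB
      cases hq : (PySem.Dict.mk kv.2).get? "pokedex" with
      | none => simp
      | some q => by_cases h : q == p <;> simp [h] <;> try omega

-- while items: p = items[0][1]["pokedex"]; <sweep>; items = rest
def pvLoopB (items : List (String × List (String × Int))) (m : PySem.Dict String String) :
    PySem.Dict String String :=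
  match items with
  | [] => m
  | (k0, v0) :: rest =>
    match hq : (PySem.Dict.mk v0).get? "pokedex" with
    | none => m                                         -- KeyError, excluded by Pre_
    | some p =>
      let st := ((k0, v0) :: rest).foldl (pvStepB p) (m, 0, [])
      pvLoopB st.2.2 st.1
termination_by items.length
decreasing_by
  simp only [List.foldl_cons]
  have h1 : pvStepB p (m, 0, []) (k0, v0)
      = (m.insert (pvId p 0) k0, 1, []) := by
    unfold pvStepB; simp [hq]
  rw [h1]
  have := pvStepB_rest_len p rest (m.insert (pvId p 0) k0, 1, [])
  simp at this ⊢
  omega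

def build_pokedb_id_to_key_map_alt (pokemons : List (String × List (String × Int))) : List (String × String) :=
  (pvLoopB pokemons PySem.Dict.empty).items

-- ===== PRECONDITION & SPEC =====
-- Pre_ excludes (a) entries whose value dict lacks a "pokedex" key — there Python A raises KeyError (B too) —
-- and (b) association lists with duplicate keys (outer or inner), which do not faithfully represent a Python
-- dict (a Python dict cannot contain a repeated key), so no Python behaviour is specified on them.
def Pre_build_pokedb_id_to_key_map (pokemons : List (String × List (String × Int))) : Prop :=
  (∀ kv ∈ pokemons, ((PySem.Dict.mk kv.2).get? "pokedex").isSome = true ∧ (kv.2.map Prod.fst).Nodup) ∧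
  (pokemons.map Prod.fst).Nodup
instance (pokemons : List (String × List (String × Int))) : Decidable (Pre_build_pokedb_id_to_key_map pokemons) := by
  unfold Pre_build_pokedb_id_to_key_map; infer_instance

def pvWitness_build_pokedb_id_to_key_map : (List (String × List (String × Int))) :=
  [("pikachu", [("pokedex", 25)]), ("pikachu-gmax", [("pokedex", 25)]), ("eevee", [("pokedex", 133)])]

def Spec_build_pokedb_id_to_key_map (pokemons : List (String × List (String × Int))) (out : List (String × String)) : Prop := out = build_pokedb_id_to_key_map_alt pokemons
instance (pokemons : List (String × List (String × Int))) (out : List (String × String)) : Decidable (Spec_build_pokedb_id_to_key_map pokemons out) := by unfold Spec_build_pokedb_id_to_key_map; infer_instance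

-- ===== CLAIM (what is proved, stated in full; the proofs are below) =====
def Claim_equal_build_pokedb_id_to_key_map : Prop := ∀ (pokemons : List (String × List (String × Int))), Dom_build_pokedb_id_to_key_map pokemons → Pre_build_pokedb_id_to_key_map pokemons → Spec_build_pokedb_id_to_key_map pokemons (build_pokedb_id_to_key_map pokemons)

-- ===== LEMMAS AND PROOFS =====

-- the pokedex number of an entry as a total function (agrees with value["pokedex"] under Pre_)
def pvPk (kv : String × List (String × Int)) : Int := (PySem.Dict.mk kv.2).getD "pokedex" 0

-- the keys of the group of pokedex number p, in items() order
def pvKeysOf (pokemons : List (String × List (String × Int))) (p : Int) : List String :=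
  (pokemons.filter (fun kv => pvPk kv == p)).map Prod.fst

-- inserting one whole group, starting at form index 0
def pvGrpIns (l : List (String × List (String × Int))) (m : PySem.Dict String String) (p : Int) :
    PySem.Dict String String :=
  (PySem.List.enumerate (pvKeysOf l p) 0).foldl (fun m ik => m.insert (pvId p ik.1) ik.2) m

theorem pvGet?_eq_some_pk {kv : String × List (String × Int)}
    (h : ((PySem.Dict.mk kv.2).get? "pokedex").isSome = true) :
    (PySem.Dict.mk kv.2).get? "pokedex" = some (pvPk kv) := by
  rcases Option.isSome_iff_exists.mp h with ⟨p, hp⟩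
  simp [pvPk, PySem.Dict.getD_eq_get?_getD, hp]

theorem pvGroupsA_eq (pokemons : List (String × List (String × Int)))
    (h : ∀ kv ∈ pokemons, ((PySem.Dict.mk kv.2).get? "pokedex").isSome = true) :
    pvGroupsA pokemons =
      pokemons.foldl (fun g kv => g.modify (pvPk kv) [] (fun ks => ks ++ [kv.1])) PySem.Dict.empty := by
  unfold pvGroupsA
  apply PySem.List.foldl_congr_mem
  intro acc kv hkv
  rw [pvGet?_eq_some_pk (h kv hkv)]

theorem pvGroupsA_getD (pokemons : List (String × List (String × Int)))
    (h : ∀ kv ∈ pokemons, ((PySem.Dict.mk kv.2).get? "pokedex").isSome = true) (p : Int) :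
    (pvGroupsA pokemons).getD p [] = pvKeysOf pokemons p := by
  have h2 : (pokemons.foldl (fun g kv => g.modify (pvPk kv) [] (fun ks => ks ++ [kv.1])) PySem.Dict.empty)
      = ((pokemons.map (fun kv => (pvPk kv, kv.1))).foldl
          (fun g q => g.modify q.1 [] (fun ks => ks ++ [q.2])) PySem.Dict.empty) := by
    rw [List.foldl_map]
  rw [pvGroupsA_eq pokemons h, h2, PySem.Dict.getD_foldl_modify_append]
  simp [pvKeysOf, List.filter_map, List.map_map, Function.comp_def]

theorem pvGroupsA_items (pokemons : List (String × List (String × Int)))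
    (h : ∀ kv ∈ pokemons, ((PySem.Dict.mk kv.2).get? "pokedex").isSome = true) :
    (pvGroupsA pokemons).items =
      (PySem.Set.ofList (pokemons.map pvPk)).map (fun p => (p, pvKeysOf pokemons p)) := by
  have hnd : (pvGroupsA pokemons).keys.Nodup := by
    rw [pvGroupsA_eq pokemons h]
    exact PySem.Dict.nodup_keys_foldl_modify_key _ _ _ _ _ (by simp [PySem.Dict.keys_empty])
  have hkeys : (pvGroupsA pokemons).keys = PySem.Set.ofList (pokemons.map pvPk) := by
    rw [pvGroupsA_eq pokemons h, PySem.Dict.keys_foldl_modify_key, PySem.Dict.keys_empty,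
      PySem.Set.update_nil_left]
  rw [PySem.Dict.items_eq_map_keys _ hnd ([] : List String), hkeys]
  exact List.map_congr_left (fun p _ => by rw [pvGroupsA_getD pokemons h p])

-- set(xs) on a cons: head first, then the distinct later elements other than the head
theorem pvOfList_cons (x : Int) (xs : List Int) :
    PySem.Set.ofList (x :: xs) = x :: PySem.Set.ofList (xs.filter (fun y => !(y == x))) := by
  have hG : ∀ (ys : List Int) (s : PySem.Set Int), x ∈ s →
      ys.foldl PySem.Set.add s = (ys.filter (fun y => !(y == x))).foldl PySem.Set.add s := by
    intro ys
    induction ys with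
    | nil => intro s _; rfl
    | cons y t ih =>
        intro s hs
        by_cases hy : y = x
        · subst hy
          have : PySem.Set.add s y = s := by simp [PySem.Set.add, PySem.Set.contains, hs]
          simpa [this] using ih s hs
        · have hxmem : x ∈ PySem.Set.add s y := by
            simp [PySem.Set.add]; split <;> simp [hs]
          simp only [List.foldl_cons, List.filter_cons]
          have : (!(y == x)) = true := by simp [hy]
          rw [this]
          simpa using ih (PySem.Set.add s y) hxmem
  have hH : ∀ (ys : List Int) (s : PySem.Set Int), x ∉ ys →
      ys.foldl PySem.Set.add (x :: s) = x :: ys.foldl PySem.Set.add s := by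
    intro ys
    induction ys with
    | nil => intro s _; rfl
    | cons y t ih =>
        intro s hy
        have h1 : y ≠ x := fun he => hy (by simp [he])
        have h2 : PySem.Set.add (x :: s) y = x :: PySem.Set.add s y := by
          simp only [PySem.Set.add, PySem.Set.contains, List.contains_cons]
          have : (y == x) = false := by simp [h1]
          rw [this]
          simp only [Bool.false_or]
          split <;> simp
        simp only [List.foldl_cons, h2]
        exact ih (PySem.Set.add s y) (fun hm => hy (by simp [hm]))
  have h0 : PySem.Set.ofList (x :: xs) = xs.foldl PySem.Set.add [x] := rfl
  rw [h0, hG xs [x] (by simp), hH _ [] (by simp)]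
  rfl

-- the inner sweep computes (group inserted from index i, new count, rest ++ non-matching entries)
theorem pvSweep (p : Int) (l : List (String × List (String × Int)))
    (h : ∀ kv ∈ l, ((PySem.Dict.mk kv.2).get? "pokedex").isSome = true)
    (m : PySem.Dict String String) (i : Int) (r : List (String × List (String × Int))) :
    l.foldl (pvStepB p) (m, i, r) =
      ((PySem.List.enumerate ((l.filter (fun kv => pvPk kv == p)).map Prod.fst) i).foldl
          (fun m ik => m.insert (pvId p ik.1) ik.2) m,
        i + ((l.filter (fun kv => pvPk kv == p)).length : Int),
        r ++ l.filter (fun kv => !(pvPk kv == p))) := by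
  induction l generalizing m i r with
  | nil => simp
  | cons kv t ih =>
      have hkv := pvGet?_eq_some_pk (h kv (by simp))
      have ht : ∀ kv ∈ t, ((PySem.Dict.mk kv.2).get? "pokedex").isSome = true :=
        fun x hx => h x (by simp [hx])
      simp only [List.foldl_cons]
      have hstep : pvStepB p (m, i, r) kv =
          if pvPk kv == p then (m.insert (pvId p i) kv.1, i + 1, r)
          else (m, i, r ++ [kv]) := by
        unfold pvStepB; rw [hkv]
      by_cases hp : pvPk kv == p
      · rw [hstep, if_pos hp, ih ht]
        simp [hp, PySem.List.enumerate_cons]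
        omega
      · rw [hstep, if_neg hp, ih ht]
        simp [hp]

-- the while loop is the fold of group-inserts over the distinct pokedex numbers
theorem pvLoopB_eq (n : Nat) (l : List (String × List (String × Int))) (hn : l.length ≤ n)
    (h : ∀ kv ∈ l, ((PySem.Dict.mk kv.2).get? "pokedex").isSome = true)
    (m : PySem.Dict String String) :
    pvLoopB l m = (PySem.Set.ofList (l.map pvPk)).foldl (fun m p => pvGrpIns l m p) m := by
  induction n generalizing l m with
  | zero =>
      have : l = [] := List.length_eq_zero_iff.mp (Nat.le_zero.mp hn)
      subst this; rw [pvLoopB]; simp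
  | succ n ih =>
      cases l with
      | nil => rw [pvLoopB]; simp
      | cons hd rest =>
          obtain ⟨k0, v0⟩ := hd
          have hkv := pvGet?_eq_some_pk (h (k0, v0) (by simp))
          rw [pvLoopB]
          split
          · exact absurd (hkv.symm.trans (by assumption)) (by simp)
          · rename_i p' hq
            have hp' : p' = pvPk (k0, v0) :=
              (Option.some.inj (hkv.symm.trans hq)).symm
            have hsw := pvSweep p' ((k0, v0) :: rest) h m 0 []
            simp only [hsw]
            set rest' := ((k0, v0) :: rest).filter (fun kv => !(pvPk kv == p')) with hrest'
            have hdrop : rest' = rest.filter (fun kv => !(pvPk kv == p')) := by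
              rw [hrest', List.filter_cons_of_neg (by simp [hp'])]
            have hlen : rest'.length ≤ n := by
              rw [hdrop]
              exact le_trans (List.length_filter_le _ _) (by simpa using hn)
            have hmem : ∀ kv ∈ rest', ((PySem.Dict.mk kv.2).get? "pokedex").isSome = true :=
              fun kv hkv2 => h kv (List.mem_of_mem_filter hkv2)
            have hgrp : (PySem.List.enumerate
                ((((k0, v0) :: rest).filter (fun kv => pvPk kv == p')).map Prod.fst) 0).foldl
                (fun m ik => m.insert (pvId p' ik.1) ik.2) m = pvGrpIns ((k0, v0) :: rest) m p' := rfl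
            simp only [List.nil_append, hgrp]
            rw [ih rest' hlen hmem]
            -- group-inserts taken over rest' agree with those taken over the full list
            have hcongr : (PySem.Set.ofList (rest'.map pvPk)).foldl (fun m q => pvGrpIns rest' m q)
                (pvGrpIns ((k0, v0) :: rest) m p')
                = (PySem.Set.ofList (rest'.map pvPk)).foldl (fun m q => pvGrpIns ((k0, v0) :: rest) m q)
                (pvGrpIns ((k0, v0) :: rest) m p') := by
              apply PySem.List.foldl_congr_mem
              intro acc q hqmem
              have hq2 : q ∈ rest'.map pvPk := by
                have := (PySem.List.mem_dedup (xs := rest'.map pvPk) (x := q)).mp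
                  (by simpa [PySem.List.dedup_eq_ofList] using hqmem)
                exact this
              obtain ⟨kv2, hkv2, rfl⟩ := List.mem_map.mp hq2
              have hne : ¬(pvPk kv2 == p') = true := by
                have := List.of_mem_filter hkv2
                simpa using this
              have hne' : pvPk kv2 ≠ p' := by simpa using hne
              have hkeys : pvKeysOf rest' (pvPk kv2) = pvKeysOf ((k0, v0) :: rest) (pvPk kv2) := by
                unfold pvKeysOf
                rw [hrest', List.filter_filter]
                congr 1
                apply List.filter_congr
                intro a _
                by_cases ha : pvPk a = pvPk kv2
                · simp [ha, hne']
                · simp [ha]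
              unfold pvGrpIns
              rw [hkeys]
            rw [hcongr]
            -- the distinct pokedex numbers of the full list: head first, then those of rest'
            have hset : PySem.Set.ofList (((k0, v0) :: rest).map pvPk)
                = p' :: PySem.Set.ofList (rest'.map pvPk) := by
              rw [List.map_cons, ← hp', pvOfList_cons, hdrop]
              congr 1
              rw [List.filter_map]
              simp [Function.comp_def]
            rw [hset]
            rfl

-- ===== VERDICT (by name: the statement is the Claim_ definition above) =====
theorem build_pokedb_id_to_key_map_spec : Claim_equal_build_pokedb_id_to_key_map := by
  intro pokemons _hdom hpre
  have h : ∀ kv ∈ pokemons, ((PySem.Dict.mk kv.2).get? "pokedex").isSome = true :=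
    fun kv hkv => (hpre.1 kv hkv).1
  unfold Spec_build_pokedb_id_to_key_map build_pokedb_id_to_key_map build_pokedb_id_to_key_map_alt
  rw [pvGroupsA_items pokemons h, List.foldl_map,
    pvLoopB_eq pokemons.length pokemons le_rfl h PySem.Dict.empty]
  rfl
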